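-- pv_equiv track=rewrite | github.com/jhawilliams42/NBA-Parley- | nba_prop_engine/phase3/joint_prob.py | _any_leg_needs_dependence
-- ===== SOURCE A (Python) =====
-- def _any_leg_needs_dependence(legs: list[dict]) -> bool:
--     """
--     Return True if any pair of legs has the same player_id or same game_id,
--     and uses a non-independence method.
--     """
--     for i, leg_a in enumerate(legs):
--         for j, leg_b in enumerate(legs):
--             if i >= j:
--                 continue
--             # Same player
--             if leg_a.get("player_id") == leg_b.get("player_id"):
--                 method = leg_a.get("dependence_method_id", "NONE_INDEPENDENCE_ALLOWED")
--                 if method != "NONE_INDEPENDENCE_ALLOWED":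
--                     return True
--             # Same game
--             if leg_a.get("game_id") == leg_b.get("game_id"):
--                 method = leg_a.get("same_game_dependence_method_id", "NONE_INDEPENDENCE_ALLOWED")
--                 if method != "NONE_INDEPENDENCE_ALLOWED":
--                     return True
--     return False
-- ===== SOURCE B (Python) =====
-- def _any_leg_needs_dependence(legs: list[dict]) -> bool:
--     """
--     Single reverse pass: walk the legs from last to first, keeping the sets of
--     player_ids / game_ids seen so far (i.e. of all LATER legs).  A leg triggers
--     dependence exactly when its id reappears later and its own method is
--     non-independence.
--     """
--     seen_players = set()
--     seen_games = set()
--     for leg in reversed(legs):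
--         p = leg.get("player_id")
--         g = leg.get("game_id")
--         if p in seen_players and leg.get("dependence_method_id", "NONE_INDEPENDENCE_ALLOWED") != "NONE_INDEPENDENCE_ALLOWED":
--             return True
--         if g in seen_games and leg.get("same_game_dependence_method_id", "NONE_INDEPENDENCE_ALLOWED") != "NONE_INDEPENDENCE_ALLOWED":
--             return True
--         seen_players.add(p)
--         seen_games.add(g)
--     return False
-- ===== Notes on version B (the rewrite author's own statement) =====
-- stated objective: faster
-- what changed: Replaced the O(n^2) all-pairs scan by a single reverse pass that maintains hash sets of the player_ids/game_ids of later legs, flagging a leg whose id reappears later and whose method is non-independence.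
import Mathlib
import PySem

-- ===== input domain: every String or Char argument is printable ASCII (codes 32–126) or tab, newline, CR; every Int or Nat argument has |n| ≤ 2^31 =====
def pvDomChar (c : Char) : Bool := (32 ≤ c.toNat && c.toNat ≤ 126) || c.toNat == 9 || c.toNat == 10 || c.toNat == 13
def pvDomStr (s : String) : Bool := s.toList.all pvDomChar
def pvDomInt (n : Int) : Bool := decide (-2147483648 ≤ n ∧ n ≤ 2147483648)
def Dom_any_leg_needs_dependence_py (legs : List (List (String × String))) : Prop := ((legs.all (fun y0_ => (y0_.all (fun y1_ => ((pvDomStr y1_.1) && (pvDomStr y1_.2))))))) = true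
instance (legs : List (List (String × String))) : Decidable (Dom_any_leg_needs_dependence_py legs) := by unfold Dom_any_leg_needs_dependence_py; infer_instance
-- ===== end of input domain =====

-- B replaces A's all-pairs scan by a single reverse pass keeping sets of the ids of later legs; the return value is proved equal.

-- ===== PORT A =====
-- literal transliteration of the two nested enumerate loops; the early 'return True' becomes Bool 'any'
def any_leg_needs_dependence_py (legs : List (List (String × String))) : Bool :=
  (PySem.List.enumerate legs).any (fun ia =>
    (PySem.List.enumerate legs).any (fun jb =>
      if ia.1 ≥ jb.1 then false   -- 'continue'
      else
        -- Same player
        (if PySem.Dict.get? (PySem.Dict.ofList ia.2) "player_id" == PySem.Dict.get? (PySem.Dict.ofList jb.2) "player_id" then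
           PySem.Dict.getD (PySem.Dict.ofList ia.2) "dependence_method_id" "NONE_INDEPENDENCE_ALLOWED" != "NONE_INDEPENDENCE_ALLOWED"
         else false)
        ||
        -- Same game
        (if PySem.Dict.get? (PySem.Dict.ofList ia.2) "game_id" == PySem.Dict.get? (PySem.Dict.ofList jb.2) "game_id" then
           PySem.Dict.getD (PySem.Dict.ofList ia.2) "same_game_dependence_method_id" "NONE_INDEPENDENCE_ALLOWED" != "NONE_INDEPENDENCE_ALLOWED"
         else false)))

-- ===== PORT B =====
-- the reverse-pass loop of Source B: sets of the player_ids / game_ids of the already-visited (later) legs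
def pvGoAlt : List (List (String × String)) → PySem.Set (Option String) → PySem.Set (Option String) → Bool
  | [], _, _ => false
  | leg :: rest, seenP, seenG =>
    let p := PySem.Dict.get? (PySem.Dict.ofList leg) "player_id"
    let g := PySem.Dict.get? (PySem.Dict.ofList leg) "game_id"
    if PySem.Set.contains seenP p &&
       (PySem.Dict.getD (PySem.Dict.ofList leg) "dependence_method_id" "NONE_INDEPENDENCE_ALLOWED" != "NONE_INDEPENDENCE_ALLOWED") then
      true
    else if PySem.Set.contains seenG g &&
       (PySem.Dict.getD (PySem.Dict.ofList leg) "same_game_dependence_method_id" "NONE_INDEPENDENCE_ALLOWED" != "NONE_INDEPENDENCE_ALLOWED") then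
      true
    else
      pvGoAlt rest (PySem.Set.add seenP p) (PySem.Set.add seenG g)

def any_leg_needs_dependence_py_alt (legs : List (List (String × String))) : Bool :=
  pvGoAlt legs.reverse PySem.Set.empty PySem.Set.empty

-- ===== PRECONDITION & SPEC =====
def Spec_any_leg_needs_dependence_py (legs : List (List (String × String))) (out : Bool) : Prop := out = any_leg_needs_dependence_py_alt legs
instance (legs : List (List (String × String))) (out : Bool) : Decidable (Spec_any_leg_needs_dependence_py legs out) := by unfold Spec_any_leg_needs_dependence_py; infer_instance

-- ===== CLAIM (what is proved, stated in full; the proofs are below) =====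
def Claim_equal_any_leg_needs_dependence_py : Prop := ∀ (legs : List (List (String × String))), Dom_any_leg_needs_dependence_py legs → Spec_any_leg_needs_dependence_py legs (any_leg_needs_dependence_py legs)

-- ===== LEMMAS AND PROOFS =====

-- abbreviations for the proofs only: the two keys and the two non-independence tests
def pvPk (leg : List (String × String)) : Option String := PySem.Dict.get? (PySem.Dict.ofList leg) "player_id"
def pvGk (leg : List (String × String)) : Option String := PySem.Dict.get? (PySem.Dict.ofList leg) "game_id"
def pvCp (leg : List (String × String)) : Bool :=
  PySem.Dict.getD (PySem.Dict.ofList leg) "dependence_method_id" "NONE_INDEPENDENCE_ALLOWED" != "NONE_INDEPENDENCE_ALLOWED"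
def pvCg (leg : List (String × String)) : Bool :=
  PySem.Dict.getD (PySem.Dict.ofList leg) "same_game_dependence_method_id" "NONE_INDEPENDENCE_ALLOWED" != "NONE_INDEPENDENCE_ALLOWED"

-- common specification: an earlier leg i shares a key with a later leg j and i's own method is non-independence
def pvS (legs : List (List (String × String))) : Prop :=
  ∃ i j, ∃ (_ : i < legs.length) (_ : j < legs.length), i < j ∧
    ((pvPk legs[i] = pvPk legs[j] ∧ pvCp legs[i] = true) ∨
     (pvGk legs[i] = pvGk legs[j] ∧ pvCg legs[i] = true))

theorem pvA_iff (legs : List (List (String × String))) :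
    any_leg_needs_dependence_py legs = true ↔ pvS legs := by
  simp [any_leg_needs_dependence_py, List.any_eq_true, PySem.List.mem_enumerate_iff, pvS, pvPk, pvGk, pvCp, pvCg]
  constructor
  · rintro ⟨k, h, k1, hlt, h1, hc⟩; exact ⟨k, k1, hlt, h, h1, hc⟩
  · rintro ⟨i, j, hlt, x, x1, hc⟩; exact ⟨i, x, j, hlt, x1, hc⟩

-- loop invariant of B: pvGoAlt fires exactly when some element's key is in the seed set or repeats earlier in l
theorem pvGoAlt_iff (l : List (List (String × String))) (sp sg : PySem.Set (Option String)) :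
    pvGoAlt l sp sg = true ↔
      ∃ i, ∃ (_ : i < l.length),
        ((pvPk l[i] ∈ sp ∨ ∃ j, ∃ (_ : j < l.length), j < i ∧ pvPk l[j] = pvPk l[i]) ∧ pvCp l[i] = true) ∨
        ((pvGk l[i] ∈ sg ∨ ∃ j, ∃ (_ : j < l.length), j < i ∧ pvGk l[j] = pvGk l[i]) ∧ pvCg l[i] = true) := by
  induction l generalizing sp sg with
  | nil => simp [pvGoAlt]
  | cons x rest ih =>
    rw [pvGoAlt]
    by_cases h1 : (PySem.Set.contains sp (PySem.Dict.get? (PySem.Dict.ofList x) "player_id") &&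
        (PySem.Dict.getD (PySem.Dict.ofList x) "dependence_method_id" "NONE_INDEPENDENCE_ALLOWED" != "NONE_INDEPENDENCE_ALLOWED")) = true
    · simp only [h1, if_pos]
      rw [Bool.and_eq_true, PySem.Set.contains_iff] at h1
      constructor
      · intro _
        exact ⟨0, by simp, Or.inl ⟨Or.inl h1.1, by simpa [pvCp] using h1.2⟩⟩
      · intro _; trivial
    · rw [if_neg h1]
      by_cases h2 : (PySem.Set.contains sg (PySem.Dict.get? (PySem.Dict.ofList x) "game_id") &&
          (PySem.Dict.getD (PySem.Dict.ofList x) "same_game_dependence_method_id" "NONE_INDEPENDENCE_ALLOWED" != "NONE_INDEPENDENCE_ALLOWED")) = true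
      · rw [if_pos h2]
        rw [Bool.and_eq_true, PySem.Set.contains_iff] at h2
        constructor
        · intro _
          exact ⟨0, by simp, Or.inr ⟨Or.inl h2.1, by simpa [pvCg] using h2.2⟩⟩
        · intro _; trivial
      · rw [if_neg h2, ih]
        simp only [Bool.and_eq_true, PySem.Set.contains_iff, not_and] at h1 h2
        constructor
        · rintro ⟨i, hi, hc⟩
          refine ⟨i + 1, by simpa using Nat.succ_lt_succ hi, ?_⟩
          rcases hc with ⟨hm, hcnd⟩ | ⟨hm, hcnd⟩
          · refine Or.inl ⟨?_, by simpa using hcnd⟩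
            rcases hm with hm | hm
            · rcases (PySem.Set.mem_add _ _ _).mp hm with hm | hm
              · exact Or.inl hm
              · exact Or.inr ⟨0, by simp, Nat.succ_pos _, by simpa [pvPk] using hm.symm⟩
            · rcases hm with ⟨j, hj, hji, he⟩
              exact Or.inr ⟨j + 1, by simpa using Nat.succ_lt_succ hj, Nat.succ_lt_succ hji, by simpa using he⟩
          · refine Or.inr ⟨?_, by simpa using hcnd⟩
            rcases hm with hm | hm
            · rcases (PySem.Set.mem_add _ _ _).mp hm with hm | hm
              · exact Or.inl hm
              · exact Or.inr ⟨0, by simp, Nat.succ_pos _, by simpa [pvGk] using hm.symm⟩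
            · rcases hm with ⟨j, hj, hji, he⟩
              exact Or.inr ⟨j + 1, by simpa using Nat.succ_lt_succ hj, Nat.succ_lt_succ hji, by simpa using he⟩
        · rintro ⟨i, hi, hc⟩
          match i, hi with
          | 0, _ =>
            exfalso
            rcases hc with ⟨hm, hcnd⟩ | ⟨hm, hcnd⟩
            · rcases hm with hm | ⟨j, hj, hji, _⟩
              · exact h1 (by simpa [pvPk] using hm) (by simpa [pvCp] using hcnd)
              · omega
            · rcases hm with hm | ⟨j, hj, hji, _⟩
              · exact h2 (by simpa [pvGk] using hm) (by simpa [pvCg] using hcnd)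
              · omega
          | i' + 1, hi =>
            refine ⟨i', by simpa using Nat.lt_of_succ_lt_succ hi, ?_⟩
            rcases hc with ⟨hm, hcnd⟩ | ⟨hm, hcnd⟩
            · refine Or.inl ⟨?_, by simpa using hcnd⟩
              rcases hm with hm | ⟨j, hj, hji, he⟩
              · exact Or.inl ((PySem.Set.mem_add _ _ _).mpr (Or.inl hm))
              · match j, hj, hji, he with
                | 0, _, _, he => exact Or.inl ((PySem.Set.mem_add _ _ _).mpr (Or.inr (by simpa [pvPk] using he.symm)))
                | j' + 1, hj, hji, he =>
                  exact Or.inr ⟨j', by simpa using Nat.lt_of_succ_lt_succ hj, Nat.lt_of_succ_lt_succ hji, by simpa using he⟩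
            · refine Or.inr ⟨?_, by simpa using hcnd⟩
              rcases hm with hm | ⟨j, hj, hji, he⟩
              · exact Or.inl ((PySem.Set.mem_add _ _ _).mpr (Or.inl hm))
              · match j, hj, hji, he with
                | 0, _, _, he => exact Or.inl ((PySem.Set.mem_add _ _ _).mpr (Or.inr (by simpa [pvGk] using he.symm)))
                | j' + 1, hj, hji, he =>
                  exact Or.inr ⟨j', by simpa using Nat.lt_of_succ_lt_succ hj, Nat.lt_of_succ_lt_succ hji, by simpa using he⟩

theorem pvB_iff (legs : List (List (String × String))) :
    any_leg_needs_dependence_py_alt legs = true ↔ pvS legs := by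
  rw [any_leg_needs_dependence_py_alt, pvGoAlt_iff]
  simp only [PySem.Set.empty, List.not_mem_nil, false_or, List.length_reverse,
    List.getElem_reverse, pvS]
  constructor
  · rintro ⟨i, hi, hc⟩
    rcases hc with ⟨⟨j, hj, hji, he⟩, hcnd⟩ | ⟨⟨j, hj, hji, he⟩, hcnd⟩
    · exact ⟨legs.length - 1 - i, legs.length - 1 - j, by omega, by omega, by omega,
        Or.inl ⟨he.symm, hcnd⟩⟩
    · exact ⟨legs.length - 1 - i, legs.length - 1 - j, by omega, by omega, by omega,
        Or.inr ⟨he.symm, hcnd⟩⟩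
  · rintro ⟨i, j, hi, hj, hij, hc⟩
    refine ⟨legs.length - 1 - i, by omega, ?_⟩
    have hri : legs.length - 1 - (legs.length - 1 - i) = i := by omega
    have hrj : legs.length - 1 - (legs.length - 1 - j) = j := by omega
    rcases hc with ⟨he, hcnd⟩ | ⟨he, hcnd⟩
    · exact Or.inl ⟨⟨legs.length - 1 - j, by omega, by omega, by simp only [hri, hrj]; exact he.symm⟩,
        by simp only [hri]; exact hcnd⟩
    · exact Or.inr ⟨⟨legs.length - 1 - j, by omega, by omega, by simp only [hri, hrj]; exact he.symm⟩,
        by simp only [hri]; exact hcnd⟩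

-- ===== VERDICT (by name: the statement is the Claim_ definition above) =====
theorem any_leg_needs_dependence_py_spec : Claim_equal_any_leg_needs_dependence_py := by
  intro legs _
  unfold Spec_any_leg_needs_dependence_py
  exact Bool.eq_iff_iff.mpr ((pvA_iff legs).trans (pvB_iff legs).symm)
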